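-- pv_equiv track=rewrite | github.com/dieupatr/RegelNetzwerk | RuleBasedNetwork/QuickAnd.py | RuleNetwork_QuickAnd
-- ===== SOURCE A (Python) =====
-- def CountNumFacts(Facts):
--
--        NumberNone=0
--        for fact in Facts:
--
--               if fact!=None :
--                      NumberNone=NumberNone+1
--
--        return NumberNone
--
-- def RuleNetwork_QuickAnd(State):
--
--        #Start
--
--        [A,B,C]=State
--        Facts=[A,B,C]
--        Num_new=CountNumFacts(Facts)
--
--        while( True ):
--
--               Num_old=Num_new
--
--               #Logic rule based network
--
--
--
--
--               if ( A==1) and  (B==1 ) : C=1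
--
--
--
--
--              #Refresh set of facts
--               Facts= [A,B,C]
--               Num_new=CountNumFacts(Facts)
--
--
--               #Check converge
--
--               if( Num_new == Num_old) :  break
--
--        return Facts
-- ===== SOURCE B (Python) =====
-- def RuleNetwork_QuickAnd(State):
--     A, B, C = State
--     if A == 1 and B == 1:
--         C = 1
--     return [A, B, C]
-- ===== Notes on version B (the rewrite author's own statement) =====
-- stated objective: simpler
-- what changed: The fixed-point while-loop and the CountNumFacts convergence counter are replaced by a single conditional assignment followed by building the result list directly: the rule can fire only once, so iteration is unnecessary.
import Mathlib
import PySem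

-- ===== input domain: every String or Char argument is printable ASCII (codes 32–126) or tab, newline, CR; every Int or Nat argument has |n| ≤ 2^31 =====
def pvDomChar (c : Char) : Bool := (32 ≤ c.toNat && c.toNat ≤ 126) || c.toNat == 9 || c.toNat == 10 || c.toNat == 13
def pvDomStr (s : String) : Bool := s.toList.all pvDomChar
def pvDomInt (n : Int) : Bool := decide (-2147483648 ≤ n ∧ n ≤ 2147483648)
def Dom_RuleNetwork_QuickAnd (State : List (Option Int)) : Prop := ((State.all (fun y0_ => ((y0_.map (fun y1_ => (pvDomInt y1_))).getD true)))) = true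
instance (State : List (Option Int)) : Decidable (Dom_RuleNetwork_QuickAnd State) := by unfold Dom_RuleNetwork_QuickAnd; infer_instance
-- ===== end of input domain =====

-- B removes A's fixed-point loop and counting helper: one conditional assignment, same return value (no observable mutation in A).

-- ===== PORT A =====
def CountNumFacts (Facts : List (Option Int)) : Int :=
  Facts.foldl (fun NumberNone fact => if fact ≠ none then NumberNone + 1 else NumberNone) 0

-- the while-True loop of A; terminates in ≤ 2 iterations (C can change at most once),
-- so a fuel of 4 is never exhausted — the fuel guard only makes the recursion total.
def quickAndLoop (fuel : Nat) (A B C : Option Int) (numNew : Int) : List (Option Int) :=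
  match fuel with
  | 0 => [A, B, C]
  | fuel + 1 =>
    let numOld := numNew
    let C' := if A = some 1 ∧ B = some 1 then some 1 else C
    let facts := [A, B, C']
    let n := CountNumFacts facts
    if n = numOld then facts else quickAndLoop fuel A B C' n

def RuleNetwork_QuickAnd (State : List (Option Int)) : List (Option Int) :=
  match State with
  | [A, B, C] => quickAndLoop 4 A B C (CountNumFacts [A, B, C])
  | _ => []   -- Python raises ValueError here (unpacking needs exactly 3 elements); excluded by Pre_

-- ===== PORT B =====
def RuleNetwork_QuickAnd_alt (State : List (Option Int)) : List (Option Int) :=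
  if State.length = 3 then
    let A := State.getD 0 none
    let B := State.getD 1 none
    let C := State.getD 2 none
    [A, B, if A = some 1 ∧ B = some 1 then some 1 else C]
  else []   -- ValueError in Python; excluded by Pre_

-- ===== PRECONDITION & SPEC =====
-- A raises ValueError unless State unpacks into exactly three elements.
def Pre_RuleNetwork_QuickAnd (State : List (Option Int)) : Prop := State.length = 3
instance (State : List (Option Int)) : Decidable (Pre_RuleNetwork_QuickAnd State) := by unfold Pre_RuleNetwork_QuickAnd; infer_instance
def pvWitness_RuleNetwork_QuickAnd : List (Option Int) := [some 1, some 1, none]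

def Spec_RuleNetwork_QuickAnd (State : List (Option Int)) (out : List (Option Int)) : Prop := out = RuleNetwork_QuickAnd_alt State
instance (State : List (Option Int)) (out : List (Option Int)) : Decidable (Spec_RuleNetwork_QuickAnd State out) := by unfold Spec_RuleNetwork_QuickAnd; infer_instance

-- ===== CLAIM (what is proved, stated in full; the proofs are below) =====
def Claim_equal_RuleNetwork_QuickAnd : Prop := ∀ (State : List (Option Int)), Dom_RuleNetwork_QuickAnd State → Pre_RuleNetwork_QuickAnd State → Spec_RuleNetwork_QuickAnd State (RuleNetwork_QuickAnd State)

-- ===== LEMMAS AND PROOFS =====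

theorem quickAnd_loop_eval (A B C : Option Int) :
    quickAndLoop 4 A B C (CountNumFacts [A, B, C]) =
      [A, B, if A = some 1 ∧ B = some 1 then some 1 else C] := by
  by_cases h : A = some 1 ∧ B = some 1
  · obtain ⟨hA, hB⟩ := h
    subst hA hB
    cases C with
    | none => simp [quickAndLoop, CountNumFacts]
    | some c => simp [quickAndLoop, CountNumFacts]
  · cases hA : A <;> cases hB : B <;> cases hC : C <;>
      simp_all [quickAndLoop, CountNumFacts]

-- ===== VERDICT (by name: the statement is the Claim_ definition above) =====
theorem RuleNetwork_QuickAnd_spec : Claim_equal_RuleNetwork_QuickAnd := by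
  intro State _ hPre
  unfold Spec_RuleNetwork_QuickAnd
  match State, hPre with
  | [A, B, C], _ =>
    simp only [RuleNetwork_QuickAnd, RuleNetwork_QuickAnd_alt, List.length_cons,
      List.length_nil, List.getD, if_pos]
    simpa using quickAnd_loop_eval A B C
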